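-- pv_equiv track=rewrite | github.com/Lishitia/NLP | Q2.py | dynamic_programming_sentences
-- ===== SOURCE A (Python) =====
-- def dynamic_programming_sentences(sentence1, sentence2):
--     # Split the sentences into words
--     x = sentence1.split()
--     y = sentence2.split()
--     m, n = len(x), len(y)
--
--     # Create the dynamic programming table, T
--     T = [[0] * (n + 1) for _ in range(m + 1)]
--
--     # Define costs for insertion, deletion, and substitution
--     def Ins(c):
--         return 1
--
--     def Del(c):
--         return 1
--
--     def Sub(a, b):
--         return 0 if a == b else 2  # Substitution cost is 2 if words are different
--
--     # Initialize the DP table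
--     for i in range(1, m + 1):
--         T[i][0] = T[i - 1][0] + Del(x[i - 1])
--     for j in range(1, n + 1):
--         T[0][j] = T[0][j - 1] + Ins(y[j - 1])
--
--     # Fill the DP table
--     for i in range(1, m + 1):
--         for j in range(1, n + 1):
--             T[i][j] = min(T[i - 1][j - 1] + Sub(x[i - 1], y[j - 1]),
--                           T[i - 1][j] + Del(x[i - 1]),
--                           T[i][j - 1] + Ins(y[j - 1]))
--
--     # Traceback to find the alignment
--     alignment_x, alignment_y = [], []
--     i, j = m, n
--     while i > 0 and j > 0:
--         if T[i][j] == T[i - 1][j - 1] + Sub(x[i - 1], y[j - 1]):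
--             alignment_x.append(x[i - 1])
--             alignment_y.append(y[j - 1])
--             i, j = i - 1, j - 1
--         elif T[i][j] == T[i - 1][j] + Del(x[i - 1]):
--             alignment_x.append(x[i - 1])
--             alignment_y.append('-')
--             i -= 1
--         else:
--             alignment_x.append('-')
--             alignment_y.append(y[j - 1])
--             j -= 1
--
--     while i > 0:
--         alignment_x.append(x[i - 1])
--         alignment_y.append('-')
--         i -= 1
--     while j > 0:
--         alignment_x.append('-')
--         alignment_y.append(y[j - 1])
--         j -= 1
--
--     # Reverse the alignments as we've built them backwards
--     alignment_x.reverse()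
--     alignment_y.reverse()
--
--     # Format the output to match the maximum word length
--     max_length_per_column = [max(len(a), len(b)) for a, b in zip(alignment_x, alignment_y)]
--     formatted_x = ' '.join(word.ljust(max_length_per_column[i]) for i, word in enumerate(alignment_x))
--     formatted_y = ' '.join(word.ljust(max_length_per_column[i]) for i, word in enumerate(alignment_y))
--     vertical_bars = ' '.join('|'.center(max_length_per_column[i]) if ax != '-' or ay != '-' else ' '.center(max_length_per_column[i]) for i, (ax, ay) in enumerate(zip(alignment_x, alignment_y)))
--
--     return T[m][n], formatted_x, vertical_bars, formatted_y
-- ===== SOURCE B (Python) =====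
-- def dynamic_programming_sentences(sentence1, sentence2):
--     x = sentence1.split()
--     y = sentence2.split()
--     m, n = len(x), len(y)
--
--     # Every DP cell carries its cost AND its full alignment outright, so there
--     # is no pointer recomputation and no traceback phase at all; only one row
--     # is kept at a time (rolling rows).
--     prev = [(j, ('-',) * j, tuple(y[:j])) for j in range(n + 1)]
--     for i in range(1, m + 1):
--         cur = [(i, tuple(x[:i]), ('-',) * i)]
--         for j in range(1, n + 1):
--             dc, dax, day = prev[j - 1]
--             uc, uax, uay = prev[j]
--             lc, lax, lay = cur[j - 1]
--             diag = dc + (0 if x[i - 1] == y[j - 1] else 2)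
--             up = uc + 1
--             left = lc + 1
--             if diag <= up and diag <= left:
--                 cur.append((diag, dax + (x[i - 1],), day + (y[j - 1],)))
--             elif up <= left:
--                 cur.append((up, uax + (x[i - 1],), uay + ('-',)))
--             else:
--                 cur.append((left, lax + ('-',), lay + (y[j - 1],)))
--         prev = cur
--     cost, ax, ay = prev[n]
--
--     # One pass per aligned column builds all three output lines together.
--     cols = []
--     for a, b in zip(ax, ay):
--         w = max(len(a), len(b))
--         l = (w - 1) // 2
--         mid = '|' if a != '-' or b != '-' else ' '
--         cols.append((a.ljust(w), ' ' * l + mid + ' ' * (w - 1 - l), b.ljust(w)))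
--     return (cost,
--             ' '.join(c[0] for c in cols),
--             ' '.join(c[1] for c in cols),
--             ' '.join(c[2] for c in cols))
-- ===== Notes on version B (the rewrite author's own statement) =====
-- stated objective: alternative
-- what changed: B makes each DP cell carry its cost together with its full alignment (built forward with tie priority diag > delete > insert), keeping only a rolling row, so the whole traceback phase of A disappears and the three output lines are formatted in one pass per column.
import Mathlib
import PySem

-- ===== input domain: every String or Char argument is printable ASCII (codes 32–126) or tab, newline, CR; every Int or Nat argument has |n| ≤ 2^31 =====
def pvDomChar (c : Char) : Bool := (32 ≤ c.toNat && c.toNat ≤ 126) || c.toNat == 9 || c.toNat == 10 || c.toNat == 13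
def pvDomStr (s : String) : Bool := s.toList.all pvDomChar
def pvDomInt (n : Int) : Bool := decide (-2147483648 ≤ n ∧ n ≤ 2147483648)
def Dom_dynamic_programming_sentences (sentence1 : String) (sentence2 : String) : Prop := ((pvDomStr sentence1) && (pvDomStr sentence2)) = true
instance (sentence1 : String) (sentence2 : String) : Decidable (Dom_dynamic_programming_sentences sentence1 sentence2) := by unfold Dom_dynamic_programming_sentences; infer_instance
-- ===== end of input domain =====

-- B stores in every DP cell its cost together with its full alignment (rolling rows), so A's
-- whole traceback phase disappears, and formats the three output lines in one pass per column.

-- ===== PORT A =====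
-- 2-D table cell read / write (Python's T[i][j] accesses are always in range)
def tget {α : Type} (d : α) (T : List (List α)) (i j : Nat) : α := (T.getD i []).getD j d
def tset {α : Type} (T : List (List α)) (i j : Nat) (v : α) : List (List α) :=
  T.set i ((T.getD i []).set j v)

def subCost (a b : String) : Int := if a = b then 0 else 2
def insCost (_ : String) : Int := 1
def delCost (_ : String) : Int := 1

-- the initialisation and fill loops of A
def buildT (x y : List String) (m n : Nat) : List (List Int) :=
  let T0 : List (List Int) := List.replicate (m+1) (List.replicate (n+1) 0)
  let T1 := (List.range' 1 m).foldl (fun T i => tset T i 0 (tget 0 T (i-1) 0 + delCost (x.getD (i-1) ""))) T0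
  let T2 := (List.range' 1 n).foldl (fun T j => tset T 0 j (tget 0 T 0 (j-1) + insCost (y.getD (j-1) ""))) T1
  (List.range' 1 m).foldl (fun T i =>
    (List.range' 1 n).foldl (fun T j =>
      tset T i j (min (min (tget 0 T (i-1) (j-1) + subCost (x.getD (i-1) "") (y.getD (j-1) ""))
                           (tget 0 T (i-1) j + delCost (x.getD (i-1) "")))
                      (tget 0 T i (j-1) + insCost (y.getD (j-1) "")))) T) T2

-- 'while i > 0 and j > 0' traceback loop of A (appends, reversed at the end, as in the Python)
def loop1A (x y : List String) (T : List (List Int)) (i j : Nat) (ax ay : List String) :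
    Nat × Nat × List String × List String :=
  if h : 0 < i ∧ 0 < j then
    if tget 0 T i j = tget 0 T (i-1) (j-1) + subCost (x.getD (i-1) "") (y.getD (j-1) "") then
      loop1A x y T (i-1) (j-1) (ax ++ [x.getD (i-1) ""]) (ay ++ [y.getD (j-1) ""])
    else if tget 0 T i j = tget 0 T (i-1) j + delCost (x.getD (i-1) "") then
      loop1A x y T (i-1) j (ax ++ [x.getD (i-1) ""]) (ay ++ ["-"])
    else
      loop1A x y T i (j-1) (ax ++ ["-"]) (ay ++ [y.getD (j-1) ""])
  else (i, j, ax, ay)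
termination_by i + j
decreasing_by all_goals omega

-- 'while i > 0' tail loop
def loop2A (x : List String) : Nat → List String → List String → List String × List String
  | 0, ax, ay => (ax, ay)
  | i+1, ax, ay => loop2A x i (ax ++ [x.getD i ""]) (ay ++ ["-"])

-- 'while j > 0' tail loop
def loop3A (y : List String) : Nat → List String → List String → List String × List String
  | 0, ax, ay => (ax, ay)
  | j+1, ax, ay => loop3A y j (ax ++ ["-"]) (ay ++ [y.getD j ""])

-- exact: Python str.ljust pads on the right with spaces up to the given width (codepoint length)
def ljustA (s : String) (k : Nat) : String :=
  String.ofList (s.toList ++ List.replicate (k - s.toList.length) ' ')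

-- exact: CPython str.center; the left margin is marg//2 + (marg & width & 1)
def centerA (s : String) (k : Nat) : String :=
  let l := s.toList.length
  if k ≤ l then s
  else
    let marg := k - l
    let left := marg / 2 + (marg &&& k &&& 1)
    String.ofList (List.replicate left ' ' ++ s.toList ++ List.replicate (marg - left) ' ')

def dynamic_programming_sentences (sentence1 : String) (sentence2 : String) : Int × String × String × String :=
  let x := PySem.Str.split₀ sentence1
  let y := PySem.Str.split₀ sentence2
  let m := x.length
  let n := y.length
  let T := buildT x y m n
  let r := loop1A x y T m n [] []
  let p := loop2A x r.1 r.2.2.1 r.2.2.2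
  let q := loop3A y r.2.1 p.1 p.2
  let ax := q.1.reverse
  let ay := q.2.reverse
  let aligned := ax.zip ay
  let ml : List Nat := aligned.map (fun p => max p.1.toList.length p.2.toList.length)
  let fx := PySem.Str.join " " ((PySem.List.enumerate ax).map (fun p => ljustA p.2 (PySem.List.pyGetD ml p.1 0)))
  let fy := PySem.Str.join " " ((PySem.List.enumerate ay).map (fun p => ljustA p.2 (PySem.List.pyGetD ml p.1 0)))
  let bars := PySem.Str.join " " ((PySem.List.enumerate aligned).map (fun p =>
    if p.2.1 ≠ "-" ∨ p.2.2 ≠ "-" then centerA "|" (PySem.List.pyGetD ml p.1 0)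
    else centerA " " (PySem.List.pyGetD ml p.1 0)))
  (tget 0 T m n, fx, bars, fy)

-- ===== PORT B =====
-- row 0 of B's table: cell (0, j) already carries its alignment ('-' gaps against y[:j])
def rowB0 (y : List String) (n : Nat) : List (Int × List String × List String) :=
  (List.range (n+1)).map (fun (j : Nat) => ((j : Int), List.replicate j "-", y.take j))

-- body of B's inner loop: extend cur by cell (i, j), choosing diag > delete > insert
def stepBalt (x y : List String) (i : Nat) (prev : List (Int × List String × List String))
    (cur : List (Int × List String × List String)) (j : Nat) :
    List (Int × List String × List String) :=
  let d := prev.getD (j-1) (0, [], [])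
  let u := prev.getD j (0, [], [])
  let l := cur.getD (j-1) (0, [], [])
  let diag := d.1 + (if x.getD (i-1) "" = y.getD (j-1) "" then (0 : Int) else 2)
  let up := u.1 + 1
  let left := l.1 + 1
  if diag ≤ up ∧ diag ≤ left then
    cur ++ [(diag, d.2.1 ++ [x.getD (i-1) ""], d.2.2 ++ [y.getD (j-1) ""])]
  else if up ≤ left then
    cur ++ [(up, u.2.1 ++ [x.getD (i-1) ""], u.2.2 ++ ["-"])]
  else
    cur ++ [(left, l.2.1 ++ ["-"], l.2.2 ++ [y.getD (j-1) ""])]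

-- one row of B: seeded with cell (i, 0), then the inner loop over the columns
def innerB (x y : List String) (i n : Nat) (prev : List (Int × List String × List String)) :
    List (Int × List String × List String) :=
  (List.range' 1 n).foldl (stepBalt x y i prev) [((i : Int), x.take i, List.replicate i "-")]

def dynamic_programming_sentences_alt (sentence1 : String) (sentence2 : String) : Int × String × String × String :=
  let x := PySem.Str.split₀ sentence1
  let y := PySem.Str.split₀ sentence2
  let m := x.length
  let n := y.length
  let last := ((List.range' 1 m).foldl (fun prev i => innerB x y i n prev) (rowB0 y n)).getD n (0, [], [])
  let cols := (last.2.1.zip last.2.2).map (fun p =>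
    let w := max p.1.toList.length p.2.toList.length
    let l := (w - 1) / 2
    let mid := if p.1 ≠ "-" ∨ p.2 ≠ "-" then '|' else ' '
    (ljustA p.1 w, String.ofList (List.replicate l ' ' ++ mid :: List.replicate (w - 1 - l) ' '), ljustA p.2 w))
  (last.1, PySem.Str.join " " (cols.map (·.1)), PySem.Str.join " " (cols.map (·.2.1)), PySem.Str.join " " (cols.map (·.2.2)))

-- ===== PRECONDITION & SPEC =====
def Spec_dynamic_programming_sentences (sentence1 : String) (sentence2 : String) (out : Int × String × String × String) : Prop := out = dynamic_programming_sentences_alt sentence1 sentence2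
instance (sentence1 : String) (sentence2 : String) (out : Int × String × String × String) : Decidable (Spec_dynamic_programming_sentences sentence1 sentence2 out) := by unfold Spec_dynamic_programming_sentences; infer_instance

-- ===== CLAIM (what is proved, stated in full; the proofs are below) =====
def Claim_equal_dynamic_programming_sentences : Prop := ∀ (sentence1 : String) (sentence2 : String), Dom_dynamic_programming_sentences sentence1 sentence2 → Spec_dynamic_programming_sentences sentence1 sentence2 (dynamic_programming_sentences sentence1 sentence2)

-- ===== LEMMAS AND PROOFS =====

-- the mathematical DP table both versions compute
def Tspec (x y : List String) : Nat → Nat → Int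
  | 0, 0 => 0
  | i+1, 0 => Tspec x y i 0 + 1
  | 0, j+1 => Tspec x y 0 j + 1
  | i+1, j+1 => min (min (Tspec x y i j + subCost (x.getD i "") (y.getD j ""))
                         (Tspec x y i (j+1) + 1))
                    (Tspec x y (i+1) j + 1)
termination_by i j => (i, j)

lemma Tspec_i0 (x y : List String) (i : Nat) : Tspec x y i 0 = (i : Int) := by
  induction i with
  | zero => simp [Tspec]
  | succ k ih => simp [Tspec, ih]

lemma Tspec_0j (x y : List String) (j : Nat) : Tspec x y 0 j = (j : Int) := by
  induction j with
  | zero => simp [Tspec]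
  | succ k ih => simp [Tspec, ih]

lemma Tspec_pos (x y : List String) (i j : Nat) (hi : 0 < i) (hj : 0 < j) :
    Tspec x y i j = min (min (Tspec x y (i-1) (j-1) + subCost (x.getD (i-1) "") (y.getD (j-1) ""))
                             (Tspec x y (i-1) j + 1))
                        (Tspec x y i (j-1) + 1) := by
  cases i with
  | zero => omega
  | succ i' =>
    cases j with
    | zero => omega
    | succ j' => simp [Tspec]

-- the alignment of A's traceback, in forward order
def align (x y : List String) (i j : Nat) : List String × List String :=
  if h : 0 < i ∧ 0 < j then
    if Tspec x y i j = Tspec x y (i-1) (j-1) + subCost (x.getD (i-1) "") (y.getD (j-1) "") then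
      ((align x y (i-1) (j-1)).1 ++ [x.getD (i-1) ""], (align x y (i-1) (j-1)).2 ++ [y.getD (j-1) ""])
    else if Tspec x y i j = Tspec x y (i-1) j + 1 then
      ((align x y (i-1) j).1 ++ [x.getD (i-1) ""], (align x y (i-1) j).2 ++ ["-"])
    else
      ((align x y i (j-1)).1 ++ ["-"], (align x y i (j-1)).2 ++ [y.getD (j-1) ""])
  else if h2 : 0 < i then
    ((align x y (i-1) j).1 ++ [x.getD (i-1) ""], (align x y (i-1) j).2 ++ ["-"])
  else if h3 : 0 < j then
    ((align x y i (j-1)).1 ++ ["-"], (align x y i (j-1)).2 ++ [y.getD (j-1) ""])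
  else ([], [])
termination_by i + j
decreasing_by all_goals omega

lemma align_len (x y : List String) (i j : Nat) :
    (align x y i j).1.length = (align x y i j).2.length := by
  fun_induction align x y i j <;> simp_all

-- shape of an (m+1) × (n+1) table
def shapeOK {α : Type} (T : List (List α)) (m n : Nat) : Prop :=
  T.length = m + 1 ∧ ∀ k, (T.getD k []).length = if k < m + 1 then n + 1 else 0

lemma shapeOK_replicate {α : Type} (m n : Nat) (d : α) :
    shapeOK (List.replicate (m+1) (List.replicate (n+1) d)) m n := by
  refine ⟨by simp, fun k => ?_⟩
  by_cases h : k < m + 1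
  · rw [List.getD_eq_getElem?_getD]; simp [h]
  · rw [List.getD_eq_getElem?_getD, List.getElem?_eq_none (by simpa using Nat.le_of_not_lt h)]
    simp [h]

lemma shapeOK_tset {α : Type} {T : List (List α)} {m n : Nat} (h : shapeOK T m n) (i j : Nat) (v : α) :
    shapeOK (tset T i j v) m n := by
  obtain ⟨h1, h2⟩ := h
  refine ⟨by simpa [tset] using h1, fun k => ?_⟩
  rw [← h2 k]
  unfold tset
  by_cases hk : k = i
  · subst hk
    by_cases hlt : k < T.length
    · rw [List.getD_eq_getElem?_getD, List.getElem?_set_self' , List.getElem?_eq_getElem hlt]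
      simp [List.getD_eq_getElem?_getD, List.getElem?_eq_getElem hlt]
    · rw [List.set_eq_of_length_le (by omega)]
  · rw [List.getD_eq_getElem?_getD, List.getElem?_set_ne (by omega), ← List.getD_eq_getElem?_getD]

lemma listGetD_set_self {α : Type} {l : List α} {i : Nat} (v : α) (d : α) (hi : i < l.length) :
    (l.set i v).getD i d = v := by
  rw [List.getD_eq_getElem?_getD, List.getElem?_set_self (by simpa using hi)]; rfl

lemma listGetD_set_ne {α : Type} {l : List α} {i i' : Nat} (v : α) (h : i' ≠ i) {d : α} :
    (l.set i v).getD i' d = l.getD i' d := by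
  rw [List.getD_eq_getElem?_getD, List.getElem?_set_ne (by omega), ← List.getD_eq_getElem?_getD]

lemma tget_tset {α : Type} {T : List (List α)} {m n : Nat} (d : α) (h : shapeOK T m n)
    {i j : Nat} (hi : i ≤ m) (hj : j ≤ n) (v : α) (i' j' : Nat) :
    tget d (tset T i j v) i' j' = if i' = i ∧ j' = j then v else tget d T i' j' := by
  obtain ⟨h1, h2⟩ := h
  have hil : i < T.length := by omega
  have hjl : j < (T.getD i []).length := by rw [h2]; split <;> omega
  unfold tget tset
  by_cases hi' : i' = i
  · subst hi'
    rw [listGetD_set_self _ _ hil]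
    by_cases hj' : j' = j
    · subst hj'
      rw [listGetD_set_self _ _ hjl]
      simp
    · rw [listGetD_set_ne _ hj']
      simp [hj']
  · rw [listGetD_set_ne _ hi']
    simp [hi']

-- characterisation of A's table after the first R filled rows
def charA (x y : List String) (m n R i j : Nat) : Int :=
  if j = 0 ∧ i ≤ m then (i : Int)
  else if i = 0 ∧ j ≤ n then (j : Int)
  else if 1 ≤ i ∧ i ≤ R ∧ 1 ≤ j ∧ j ≤ n then Tspec x y i j else 0

lemma charA_eq_Tspec (x y : List String) {m n R i j : Nat} (hi : i ≤ m) (hj : j ≤ n)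
    (h : i ≤ R ∨ j = 0 ∨ i = 0) : charA x y m n R i j = Tspec x y i j := by
  unfold charA
  split_ifs with c1 c2 c3
  · obtain ⟨rfl, -⟩ := c1; exact (Tspec_i0 x y i).symm
  · obtain ⟨rfl, -⟩ := c2; exact (Tspec_0j x y j).symm
  · rfl
  · omega

lemma tget_replicate {α : Type} (d c : α) {m n i j : Nat} (hi : i ≤ m) (hj : j ≤ n) :
    tget d (List.replicate (m+1) (List.replicate (n+1) c)) i j = c := by
  unfold tget
  rw [List.getD_replicate _ (by omega), List.getD_replicate _ (by omega)]

lemma initA_char (x y : List String) (m n : Nat) :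
    ∀ K, K ≤ m →
      shapeOK ((List.range' 1 K).foldl (fun T i => tset T i 0 (tget 0 T (i-1) 0 + delCost (x.getD (i-1) "")))
        (List.replicate (m+1) (List.replicate (n+1) 0))) m n ∧
      ∀ i j, i ≤ m → j ≤ n →
        tget 0 ((List.range' 1 K).foldl (fun T i => tset T i 0 (tget 0 T (i-1) 0 + delCost (x.getD (i-1) "")))
          (List.replicate (m+1) (List.replicate (n+1) 0))) i j
        = if j = 0 ∧ i ≤ K then (i : Int) else 0 := by
  intro K
  induction K with
  | zero =>
    intro _
    refine ⟨shapeOK_replicate m n 0, fun i j hi hj => ?_⟩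
    rw [List.range', List.foldl_nil, tget_replicate 0 0 hi hj]
    split_ifs with hc
    · obtain ⟨-, h2⟩ := hc
      omega
    · rfl
  | succ K ih =>
    intro hK
    obtain ⟨hsh, hch⟩ := ih (by omega)
    rw [List.range'_1_concat, List.foldl_append, List.foldl_cons, List.foldl_nil]
    refine ⟨shapeOK_tset hsh _ _ _, fun i j hi hj => ?_⟩
    rw [tget_tset 0 hsh (by omega) (by omega)]
    rw [show 1+K-1 = K from by omega]
    rw [hch K 0 (by omega) (by omega), hch i j hi hj]
    simp only [delCost]
    split_ifs <;> (try simp only [true_and] at *) <;> (try push_cast) <;> omega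

lemma initA2_char (x y : List String) (m n : Nat) (T1 : List (List Int)) (hsh : shapeOK T1 m n)
    (hch : ∀ i j, i ≤ m → j ≤ n → tget 0 T1 i j = if j = 0 ∧ i ≤ m then (i : Int) else 0) :
    ∀ K, K ≤ n →
      shapeOK ((List.range' 1 K).foldl (fun T j => tset T 0 j (tget 0 T 0 (j-1) + insCost (y.getD (j-1) ""))) T1) m n ∧
      ∀ i j, i ≤ m → j ≤ n →
        tget 0 ((List.range' 1 K).foldl (fun T j => tset T 0 j (tget 0 T 0 (j-1) + insCost (y.getD (j-1) ""))) T1) i j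
        = if j = 0 ∧ i ≤ m then (i : Int) else if i = 0 ∧ j ≤ K then (j : Int) else 0 := by
  intro K
  induction K with
  | zero =>
    intro _
    refine ⟨hsh, fun i j hi hj => ?_⟩
    rw [List.range', List.foldl_nil, hch i j hi hj]
    split_ifs <;> first | rfl | omega
  | succ K ih =>
    intro hK
    obtain ⟨hsh', hch'⟩ := ih (by omega)
    rw [List.range'_1_concat, List.foldl_append, List.foldl_cons, List.foldl_nil]
    refine ⟨shapeOK_tset hsh' _ _ _, fun i j hi hj => ?_⟩
    rw [tget_tset 0 hsh' (by omega) (by omega)]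
    rw [show 1+K-1 = K from by omega]
    rw [hch' 0 K (by omega) (by omega), hch' i j hi hj]
    simp only [insCost]
    split_ifs <;> (try simp only [true_and] at *) <;> (try push_cast) <;> omega

lemma fillrowA (x y : List String) (m n r : Nat) (hr1 : 1 ≤ r) (hrm : r ≤ m)
    (T : List (List Int)) (hsh : shapeOK T m n)
    (hch : ∀ i j, i ≤ m → j ≤ n → tget 0 T i j = charA x y m n (r-1) i j) :
    ∀ C, C ≤ n →
      shapeOK ((List.range' 1 C).foldl (fun T j =>
        tset T r j (min (min (tget 0 T (r-1) (j-1) + subCost (x.getD (r-1) "") (y.getD (j-1) ""))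
                             (tget 0 T (r-1) j + delCost (x.getD (r-1) "")))
                        (tget 0 T r (j-1) + insCost (y.getD (j-1) "")))) T) m n ∧
      ∀ i j, i ≤ m → j ≤ n →
        tget 0 ((List.range' 1 C).foldl (fun T j =>
          tset T r j (min (min (tget 0 T (r-1) (j-1) + subCost (x.getD (r-1) "") (y.getD (j-1) ""))
                               (tget 0 T (r-1) j + delCost (x.getD (r-1) "")))
                          (tget 0 T r (j-1) + insCost (y.getD (j-1) "")))) T) i j
        = if i = r ∧ 1 ≤ j ∧ j ≤ C then Tspec x y r j else charA x y m n (r-1) i j := by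
  intro C
  induction C with
  | zero =>
    intro _
    refine ⟨hsh, fun i j hi hj => ?_⟩
    rw [List.range', List.foldl_nil, hch i j hi hj]
    split_ifs <;> first | rfl | omega
  | succ C ih =>
    intro hC
    obtain ⟨hsh', hch'⟩ := ih (by omega)
    rw [List.range'_1_concat, List.foldl_append, List.foldl_cons, List.foldl_nil]
    refine ⟨shapeOK_tset hsh' _ _ _, fun i j hi hj => ?_⟩
    have e1 : tget 0 ((List.range' 1 C).foldl (fun T j =>
          tset T r j (min (min (tget 0 T (r-1) (j-1) + subCost (x.getD (r-1) "") (y.getD (j-1) ""))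
                               (tget 0 T (r-1) j + delCost (x.getD (r-1) "")))
                          (tget 0 T r (j-1) + insCost (y.getD (j-1) "")))) T) (r-1) (1+C-1)
        = Tspec x y (r-1) C := by
      rw [hch' (r-1) (1+C-1) (by omega) (by omega), if_neg (by omega)]
      have : 1+C-1 = C := by omega
      rw [this, charA_eq_Tspec x y (by omega) (by omega) (by omega)]
    have e2 : tget 0 ((List.range' 1 C).foldl (fun T j =>
          tset T r j (min (min (tget 0 T (r-1) (j-1) + subCost (x.getD (r-1) "") (y.getD (j-1) ""))
                               (tget 0 T (r-1) j + delCost (x.getD (r-1) "")))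
                          (tget 0 T r (j-1) + insCost (y.getD (j-1) "")))) T) (r-1) (1+C)
        = Tspec x y (r-1) (1+C) := by
      rw [hch' (r-1) (1+C) (by omega) (by omega), if_neg (by omega)]
      rw [charA_eq_Tspec x y (by omega) (by omega) (by omega)]
    have e3 : tget 0 ((List.range' 1 C).foldl (fun T j =>
          tset T r j (min (min (tget 0 T (r-1) (j-1) + subCost (x.getD (r-1) "") (y.getD (j-1) ""))
                               (tget 0 T (r-1) j + delCost (x.getD (r-1) "")))
                          (tget 0 T r (j-1) + insCost (y.getD (j-1) "")))) T) r (1+C-1)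
        = Tspec x y r C := by
      have hc : 1+C-1 = C := by omega
      rw [hch' r (1+C-1) (by omega) (by omega), hc]
      by_cases hC0 : C = 0
      · subst hC0
        rw [if_neg (by omega), charA_eq_Tspec x y (by omega) (by omega) (by omega)]
      · rw [if_pos (by omega)]
    rw [tget_tset 0 hsh' (by omega) (by omega), e1, e2, e3, hch' i j hi hj]
    have hval : min (min (Tspec x y (r-1) C + subCost (x.getD (r-1) "") (y.getD (1+C-1) ""))
                         (Tspec x y (r-1) (1+C) + delCost (x.getD (r-1) "")))
                    (Tspec x y r C + insCost (y.getD (1+C-1) ""))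
        = Tspec x y r (1+C) := by
      rw [Tspec_pos x y r (1+C) (by omega) (by omega)]
      simp only [delCost, insCost]
      have h1 : 1+C-1 = C := by omega
      rw [h1]
    rw [hval]
    by_cases c1 : i = r ∧ j = 1+C
    · obtain ⟨rfl, rfl⟩ := c1
      rw [if_pos ⟨rfl, rfl⟩, if_pos (by omega)]
    · rw [if_neg c1]
      by_cases c2 : i = r ∧ 1 ≤ j ∧ j ≤ C
      · rw [if_pos c2, if_pos (by omega)]
      · rw [if_neg c2, if_neg (by omega)]

lemma charA_succ (x y : List String) {m n R i j : Nat} (hi : i ≤ m) (hj : j ≤ n) :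
    (if i = R+1 ∧ 1 ≤ j ∧ j ≤ n then Tspec x y (R+1) j else charA x y m n R i j)
      = charA x y m n (R+1) i j := by
  unfold charA
  by_cases c1 : i = R+1 ∧ 1 ≤ j ∧ j ≤ n
  · obtain ⟨rfl, hj1, hjn⟩ := c1
    rw [if_pos ⟨rfl, hj1, hjn⟩, if_neg (by omega), if_neg (by omega), if_pos (by omega)]
  · rw [if_neg c1]
    by_cases d1 : j = 0 ∧ i ≤ m
    · rw [if_pos d1, if_pos d1]
    · rw [if_neg d1, if_neg d1]
      by_cases d2 : i = 0 ∧ j ≤ n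
      · rw [if_pos d2, if_pos d2]
      · rw [if_neg d2, if_neg d2]
        by_cases d3 : 1 ≤ i ∧ i ≤ R ∧ 1 ≤ j ∧ j ≤ n
        · rw [if_pos d3, if_pos (by omega)]
        · rw [if_neg d3, if_neg (by omega)]

lemma buildT_char (x y : List String) (m n : Nat) (hm : m = x.length) (hn : n = y.length) :
    ∀ R, R ≤ m →
      shapeOK ((List.range' 1 R).foldl (fun T i =>
        (List.range' 1 n).foldl (fun T j =>
          tset T i j (min (min (tget 0 T (i-1) (j-1) + subCost (x.getD (i-1) "") (y.getD (j-1) ""))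
                               (tget 0 T (i-1) j + delCost (x.getD (i-1) "")))
                          (tget 0 T i (j-1) + insCost (y.getD (j-1) "")))) T)
        ((List.range' 1 n).foldl (fun T j => tset T 0 j (tget 0 T 0 (j-1) + insCost (y.getD (j-1) "")))
          ((List.range' 1 m).foldl (fun T i => tset T i 0 (tget 0 T (i-1) 0 + delCost (x.getD (i-1) "")))
            (List.replicate (m+1) (List.replicate (n+1) 0))))) m n ∧
      ∀ i j, i ≤ m → j ≤ n →
        tget 0 ((List.range' 1 R).foldl (fun T i =>
          (List.range' 1 n).foldl (fun T j =>
            tset T i j (min (min (tget 0 T (i-1) (j-1) + subCost (x.getD (i-1) "") (y.getD (j-1) ""))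
                                 (tget 0 T (i-1) j + delCost (x.getD (i-1) "")))
                            (tget 0 T i (j-1) + insCost (y.getD (j-1) "")))) T)
          ((List.range' 1 n).foldl (fun T j => tset T 0 j (tget 0 T 0 (j-1) + insCost (y.getD (j-1) "")))
            ((List.range' 1 m).foldl (fun T i => tset T i 0 (tget 0 T (i-1) 0 + delCost (x.getD (i-1) "")))
              (List.replicate (m+1) (List.replicate (n+1) 0))))) i j
        = charA x y m n R i j := by
  intro R
  induction R with
  | zero =>
    intro _
    obtain ⟨hs1, hc1⟩ := initA_char x y m n m (le_refl m)
    obtain ⟨hs2, hc2⟩ := initA2_char x y m n _ hs1 hc1 n (le_refl n)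
    refine ⟨by simpa using hs2, fun i j hi hj => ?_⟩
    rw [List.range', List.foldl_nil, hc2 i j hi hj]
    unfold charA
    split_ifs <;> first | rfl | omega
  | succ R ih =>
    intro hR
    obtain ⟨hsh, hch⟩ := ih (by omega)
    rw [List.range'_1_concat, List.foldl_append, List.foldl_cons, List.foldl_nil]
    have h1R : 1 + R = R + 1 := by omega
    rw [h1R]
    obtain ⟨hs', hc'⟩ := fillrowA x y m n (R+1) (by omega) (by omega) _ hsh
      (by intro i j hi hj; simp only [Nat.add_sub_cancel]; exact hch i j hi hj) n (le_refl n)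
    refine ⟨hs', fun i j hi hj => ?_⟩
    rw [hc' i j hi hj]
    have : R + 1 - 1 = R := by omega
    rw [this, charA_succ x y hi hj]

lemma buildT_eq (x y : List String) :
    ∀ i j, i ≤ x.length → j ≤ y.length →
      tget 0 (buildT x y x.length y.length) i j = Tspec x y i j := by
  intro i j hi hj
  obtain ⟨-, hch⟩ := buildT_char x y x.length y.length rfl rfl x.length (le_refl _)
  unfold buildT
  rw [hch i j hi hj, charA_eq_Tspec x y hi hj (Or.inl hi)]

-- A's two tail loops applied after the main loop
def postA (x y : List String) (s : Nat × Nat × List String × List String) : List String × List String :=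
  loop3A y s.2.1 (loop2A x s.1 s.2.2.1 s.2.2.2).1 (loop2A x s.1 s.2.2.1 s.2.2.2).2

lemma postA_loop1A (x y : List String) (T : List (List Int))
    (hT : ∀ i j, i ≤ x.length → j ≤ y.length → tget 0 T i j = Tspec x y i j) :
    ∀ (N i j : Nat), i + j ≤ N → i ≤ x.length → j ≤ y.length → ∀ ax ay,
      postA x y (loop1A x y T i j ax ay) =
        (ax ++ (align x y i j).1.reverse, ay ++ (align x y i j).2.reverse) := by
  intro N
  induction N with
  | zero =>
    intro i j hN hi hj ax ay
    have hi0 : i = 0 := by omega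
    have hj0 : j = 0 := by omega
    subst hi0; subst hj0
    rw [loop1A, dif_neg (by omega), align]
    simp [postA, loop2A, loop3A]
  | succ N ih =>
    intro i j hN hi hj ax ay
    by_cases h : 0 < i ∧ 0 < j
    · rw [loop1A, dif_pos h, align, dif_pos h]
      rw [hT i j hi hj, hT (i-1) (j-1) (by omega) (by omega), hT (i-1) j (by omega) hj]
      by_cases c1 : Tspec x y i j = Tspec x y (i-1) (j-1) + subCost (x.getD (i-1) "") (y.getD (j-1) "")
      · rw [if_pos c1, if_pos c1, ih (i-1) (j-1) (by omega) (by omega) (by omega)]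
        simp [List.append_assoc]
      · rw [if_neg c1, if_neg c1]
        by_cases c2 : Tspec x y i j = Tspec x y (i-1) j + delCost (x.getD (i-1) "")
        · rw [if_pos c2, if_pos (by simpa [delCost] using c2), ih (i-1) j (by omega) (by omega) hj]
          simp [List.append_assoc]
        · rw [if_neg c2, if_neg (by simpa [delCost] using c2), ih i (j-1) (by omega) hi (by omega)]
          simp [List.append_assoc]
    · rw [loop1A, dif_neg h]
      rcases Nat.eq_zero_or_pos i with hi0 | hip
      · subst hi0
        rcases Nat.eq_zero_or_pos j with hj0 | hjp
        · subst hj0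
          rw [align]
          simp [postA, loop2A, loop3A]
        · obtain ⟨j', rfl⟩ := Nat.exists_eq_succ_of_ne_zero (by omega : j ≠ 0)
          simp only [Nat.succ_eq_add_one]
          have halign : align x y 0 (j'+1) = ((align x y 0 j').1 ++ ["-"], (align x y 0 j').2 ++ [y.getD j' ""]) := by
            rw [align, dif_neg (by omega), dif_neg (by omega), dif_pos (by omega)]
            simp
          have step : postA x y (0, j'+1, ax, ay) = postA x y (0, j', ax ++ ["-"], ay ++ [y.getD j' ""]) := by
            simp [postA, loop2A, loop3A]
          rw [step]
          have := ih 0 j' (by omega) (by omega) (by omega) (ax ++ ["-"]) (ay ++ [y.getD j' ""])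
          rw [loop1A, dif_neg (by omega)] at this
          rw [this, halign]
          simp [List.append_assoc]
      · have hj0 : j = 0 := by omega
        subst hj0
        obtain ⟨i', rfl⟩ := Nat.exists_eq_succ_of_ne_zero (by omega : i ≠ 0)
        simp only [Nat.succ_eq_add_one]
        have halign : align x y (i'+1) 0 = ((align x y i' 0).1 ++ [x.getD i' ""], (align x y i' 0).2 ++ ["-"]) := by
          rw [align, dif_neg (by omega), dif_pos (by omega)]
          simp
        have step : postA x y (i'+1, 0, ax, ay) = postA x y (i', 0, ax ++ [x.getD i' ""], ay ++ ["-"]) := by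
          simp [postA, loop2A, loop3A]
        rw [step]
        have := ih i' 0 (by omega) (by omega) (by omega) (ax ++ [x.getD i' ""]) (ay ++ ["-"])
        rw [loop1A, dif_neg (by omega)] at this
        rw [this, halign]
        simp [List.append_assoc]

-- ===== B-side lemmas =====

-- the value B's cell (i, j) must hold
def cellB (x y : List String) (i j : Nat) : Int × List String × List String :=
  (Tspec x y i j, (align x y i j).1, (align x y i j).2)

lemma align_i0 (x y : List String) : ∀ i, i ≤ x.length →
    align x y i 0 = (x.take i, List.replicate i "-") := by
  intro i
  induction i with
  | zero => intro _; rw [align]; simp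
  | succ i ih =>
    intro hi
    rw [align, dif_neg (by omega), dif_pos (by omega)]
    simp only [Nat.add_sub_cancel]
    rw [ih (by omega)]
    have hx : x.take (i+1) = x.take i ++ [x.getD i ""] := by
      rw [List.take_add_one, List.getElem?_eq_getElem (by omega : i < x.length),
          List.getD_eq_getElem x "" (by omega)]
      rfl
    rw [hx, List.replicate_succ']

lemma align_0j (x y : List String) : ∀ j, j ≤ y.length →
    align x y 0 j = (List.replicate j "-", y.take j) := by
  intro j
  induction j with
  | zero => intro _; rw [align]; simp
  | succ j ih =>
    intro hj
    rw [align, dif_neg (by omega), dif_neg (by omega), dif_pos (by omega)]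
    simp only [Nat.add_sub_cancel]
    rw [ih (by omega)]
    have hy : y.take (j+1) = y.take j ++ [y.getD j ""] := by
      rw [List.take_add_one, List.getElem?_eq_getElem (by omega : j < y.length),
          List.getD_eq_getElem y "" (by omega)]
      rfl
    rw [hy, List.replicate_succ']

lemma rowB0_eq (x y : List String) :
    rowB0 y y.length = (List.range (y.length+1)).map (fun j => cellB x y 0 j) := by
  unfold rowB0
  apply List.map_congr_left
  intro j hj
  rw [List.mem_range] at hj
  unfold cellB
  rw [Tspec_0j, align_0j x y j (by omega)]

lemma innerB_char (x y : List String) (i : Nat) (hi1 : 1 ≤ i) (him : i ≤ x.length) :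
    ∀ C, C ≤ y.length →
      (List.range' 1 C).foldl (stepBalt x y i ((List.range (y.length+1)).map (fun j => cellB x y (i-1) j)))
          [((i : Int), x.take i, List.replicate i "-")]
        = (List.range (C+1)).map (fun j => cellB x y i j) := by
  intro C
  induction C with
  | zero =>
    intro _
    rw [List.range', List.foldl_nil]
    have h0 : cellB x y i 0 = ((i : Int), x.take i, List.replicate i "-") := by
      unfold cellB
      rw [Tspec_i0, align_i0 x y i him]
    simp [List.range_succ, h0]
  | succ C ih =>
    intro hC
    rw [List.range'_1_concat, List.foldl_append, List.foldl_cons, List.foldl_nil, ih (by omega)]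
    rw [show (1:Nat)+C = C+1 from by omega]
    unfold stepBalt
    simp only [Nat.add_sub_cancel]
    rw [PySem.List.getD_map_range _ _ _ _ (by omega : C < y.length+1),
        PySem.List.getD_map_range _ _ _ _ (by omega : C+1 < y.length+1),
        PySem.List.getD_map_range _ _ _ _ (by omega : C < C+1)]
    simp only [cellB]
    have hsub : (if x.getD (i-1) "" = y.getD C "" then (0:Int) else 2)
        = subCost (x.getD (i-1) "") (y.getD C "") := rfl
    rw [hsub]
    have hT := Tspec_pos x y i (C+1) (by omega) (by omega)
    simp only [Nat.add_sub_cancel] at hT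
    have halign : align x y i (C+1)
        = if Tspec x y i (C+1) = Tspec x y (i-1) C + subCost (x.getD (i-1) "") (y.getD C "") then
            ((align x y (i-1) C).1 ++ [x.getD (i-1) ""], (align x y (i-1) C).2 ++ [y.getD C ""])
          else if Tspec x y i (C+1) = Tspec x y (i-1) (C+1) + 1 then
            ((align x y (i-1) (C+1)).1 ++ [x.getD (i-1) ""], (align x y (i-1) (C+1)).2 ++ ["-"])
          else
            ((align x y i C).1 ++ ["-"], (align x y i C).2 ++ [y.getD C ""]) := by
      rw [align, dif_pos (by omega : 0 < i ∧ 0 < C+1)]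
      simp only [Nat.add_sub_cancel]
    have hsplit : (List.range (C+1+1)).map (fun j => (Tspec x y i j, (align x y i j).1, (align x y i j).2))
        = (List.range (C+1)).map (fun j => (Tspec x y i j, (align x y i j).1, (align x y i j).2))
          ++ [(Tspec x y i (C+1), (align x y i (C+1)).1, (align x y i (C+1)).2)] := by
      rw [List.range_succ, List.map_append]
      rfl
    rw [hsplit]
    by_cases c1 : Tspec x y (i-1) C + subCost (x.getD (i-1) "") (y.getD C "") ≤ Tspec x y (i-1) (C+1) + 1
        ∧ Tspec x y (i-1) C + subCost (x.getD (i-1) "") (y.getD C "") ≤ Tspec x y i C + 1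
    · rw [if_pos c1]
      have hv : Tspec x y i (C+1) = Tspec x y (i-1) C + subCost (x.getD (i-1) "") (y.getD C "") := by
        omega
      rw [halign, if_pos hv, hv]
    · rw [if_neg c1]
      have hnot1 : ¬ Tspec x y i (C+1) = Tspec x y (i-1) C + subCost (x.getD (i-1) "") (y.getD C "") := by
        omega
      by_cases c2 : Tspec x y (i-1) (C+1) + 1 ≤ Tspec x y i C + 1
      · rw [if_pos c2]
        have hv : Tspec x y i (C+1) = Tspec x y (i-1) (C+1) + 1 := by omega
        rw [halign, if_neg hnot1, if_pos hv, hv]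
      · rw [if_neg c2]
        have hv : Tspec x y i (C+1) = Tspec x y i C + 1 := by omega
        have hnot2 : ¬ Tspec x y i (C+1) = Tspec x y (i-1) (C+1) + 1 := by omega
        rw [halign, if_neg hnot1, if_neg hnot2, hv]

lemma rowsB_char (x y : List String) :
    ∀ R, R ≤ x.length →
      (List.range' 1 R).foldl (fun prev i => innerB x y i y.length prev) (rowB0 y y.length)
        = (List.range (y.length+1)).map (fun j => cellB x y R j) := by
  intro R
  induction R with
  | zero =>
    intro _
    rw [List.range', List.foldl_nil, rowB0_eq x y]
  | succ R ih =>
    intro hR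
    rw [List.range'_1_concat, List.foldl_append, List.foldl_cons, List.foldl_nil, ih (by omega)]
    unfold innerB
    have := innerB_char x y (1+R) (by omega) (by omega) y.length (le_refl _)
    rw [show (1:Nat)+R-1 = R from by omega] at this
    rw [this, show (1:Nat)+R = R+1 from by omega]

-- ===== formatting lemmas =====

-- CPython centre of a one-character string: the bit trick (marg & k & 1) is 0 because marg = k-1
lemma band_succ_self (k : Nat) (hk : 1 ≤ k) : (k - 1) &&& k &&& 1 = 0 := by
  rw [Nat.and_assoc, Nat.and_one_is_mod k]
  rcases Nat.mod_two_eq_zero_or_one k with h | h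
  · rw [h, Nat.and_zero]
  · rw [h, Nat.and_one_is_mod]
    omega

lemma centerA_one (s : String) (c : Char) (hs : s.toList = [c]) (k : Nat) :
    centerA s k = String.ofList (List.replicate ((k-1)/2) ' ' ++ c :: List.replicate (k-1-(k-1)/2) ' ') := by
  unfold centerA
  simp only [hs, List.length_cons, List.length_nil]
  by_cases hk : k ≤ 0 + 1
  · rw [if_pos hk]
    have h1 : (k-1)/2 = 0 := by omega
    have h2 : k-1-(k-1)/2 = 0 := by omega
    rw [h2, h1]
    simp only [List.replicate_zero, List.nil_append]
    rw [← hs, String.ofList_toList]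
  · rw [if_neg hk]
    have hb := band_succ_self k (by omega)
    rw [show k - (0+1) = k - 1 from by omega, hb, Nat.add_zero]
    simp [hs]

lemma fmt_fx (u v : List String) (h : u.length = v.length) :
    (PySem.List.enumerate u).map (fun p => ljustA p.2
        (PySem.List.pyGetD ((u.zip v).map (fun p => max p.1.toList.length p.2.toList.length)) p.1 0))
      = (u.zip v).map (fun q => ljustA q.1 (max q.1.toList.length q.2.toList.length)) := by
  apply List.ext_getElem
  · simp [PySem.List.length_enumerate, h]
  · intro k h1 h2
    simp only [List.getElem_map]
    rw [PySem.List.getElem_enumerate]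
    have hk : k < u.length := by simpa [PySem.List.length_enumerate] using h1
    have hkz : k < (u.zip v).length := by simp [h] at h2 ⊢; omega
    simp only [zero_add, PySem.List.pyGetD_natCast]
    rw [List.getD_eq_getElem _ _ (by simpa using hkz), List.getElem_map, List.getElem_zip]

lemma fmt_fy (u v : List String) (h : u.length = v.length) :
    (PySem.List.enumerate v).map (fun p => ljustA p.2
        (PySem.List.pyGetD ((u.zip v).map (fun p => max p.1.toList.length p.2.toList.length)) p.1 0))
      = (u.zip v).map (fun q => ljustA q.2 (max q.1.toList.length q.2.toList.length)) := by
  apply List.ext_getElem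
  · simp [PySem.List.length_enumerate, h]
  · intro k h1 h2
    simp only [List.getElem_map]
    rw [PySem.List.getElem_enumerate]
    have hkz : k < (u.zip v).length := by simp [h] at h2 ⊢; omega
    simp only [zero_add, PySem.List.pyGetD_natCast]
    rw [List.getD_eq_getElem _ _ (by simpa using hkz), List.getElem_map, List.getElem_zip]

lemma fmt_bar (u v : List String) :
    (PySem.List.enumerate (u.zip v)).map (fun p =>
        if p.2.1 ≠ "-" ∨ p.2.2 ≠ "-" then
          centerA "|" (PySem.List.pyGetD ((u.zip v).map (fun p => max p.1.toList.length p.2.toList.length)) p.1 0)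
        else centerA " " (PySem.List.pyGetD ((u.zip v).map (fun p => max p.1.toList.length p.2.toList.length)) p.1 0))
      = (u.zip v).map (fun q =>
          String.ofList (List.replicate ((max q.1.toList.length q.2.toList.length - 1)/2) ' '
            ++ (if q.1 ≠ "-" ∨ q.2 ≠ "-" then '|' else ' ')
            :: List.replicate (max q.1.toList.length q.2.toList.length - 1
                 - (max q.1.toList.length q.2.toList.length - 1)/2) ' ')) := by
  apply List.ext_getElem
  · simp [PySem.List.length_enumerate]
  · intro k h1 h2
    simp only [List.getElem_map]
    rw [PySem.List.getElem_enumerate]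
    have hkz : k < (u.zip v).length := by simpa [PySem.List.length_enumerate] using h1
    simp only [zero_add, PySem.List.pyGetD_natCast]
    rw [List.getD_eq_getElem _ _ (by simpa using hkz), List.getElem_map]
    split_ifs with hc
    · rw [centerA_one "|" '|' rfl]
    · rw [centerA_one " " ' ' rfl]

-- ===== main equality =====

lemma main_eq (s1 s2 : String) :
    dynamic_programming_sentences s1 s2 = dynamic_programming_sentences_alt s1 s2 := by
  simp only [dynamic_programming_sentences, dynamic_programming_sentences_alt]
  have hlast : ((List.range' 1 (PySem.Str.split₀ s1).length).foldl
        (fun prev i => innerB (PySem.Str.split₀ s1) (PySem.Str.split₀ s2) i (PySem.Str.split₀ s2).length prev)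
        (rowB0 (PySem.Str.split₀ s2) (PySem.Str.split₀ s2).length)).getD (PySem.Str.split₀ s2).length (0, [], [])
      = cellB (PySem.Str.split₀ s1) (PySem.Str.split₀ s2) (PySem.Str.split₀ s1).length (PySem.Str.split₀ s2).length := by
    rw [rowsB_char (PySem.Str.split₀ s1) (PySem.Str.split₀ s2) (PySem.Str.split₀ s1).length (le_refl _),
        PySem.List.getD_map_range _ _ _ _ (by omega)]
  rw [hlast]
  have hpost := postA_loop1A (PySem.Str.split₀ s1) (PySem.Str.split₀ s2)
      (buildT (PySem.Str.split₀ s1) (PySem.Str.split₀ s2) (PySem.Str.split₀ s1).length (PySem.Str.split₀ s2).length)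
      (buildT_eq _ _) ((PySem.Str.split₀ s1).length + (PySem.Str.split₀ s2).length)
      (PySem.Str.split₀ s1).length (PySem.Str.split₀ s2).length (le_refl _) (le_refl _) (le_refl _) [] []
  unfold postA at hpost
  simp only [List.nil_append] at hpost
  rw [Prod.ext_iff] at hpost
  obtain ⟨hp1, hp2⟩ := hpost
  rw [hp1, hp2, List.reverse_reverse, List.reverse_reverse]
  unfold cellB
  rw [buildT_eq _ _ _ _ (le_refl _) (le_refl _)]
  simp only [Prod.mk.injEq]
  have hl := align_len (PySem.Str.split₀ s1) (PySem.Str.split₀ s2) (PySem.Str.split₀ s1).length (PySem.Str.split₀ s2).length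
  refine ⟨trivial, ?_, ?_, ?_⟩
  · rw [fmt_fx _ _ hl, List.map_map]
    rfl
  · rw [fmt_bar, List.map_map]
    rfl
  · rw [fmt_fy _ _ hl, List.map_map]
    rfl

-- ===== VERDICT (by name: the statement is the Claim_ definition above) =====
theorem dynamic_programming_sentences_spec : Claim_equal_dynamic_programming_sentences := by
  intro s1 s2 _
  exact main_eq s1 s2
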